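-- pv_equiv track=rewrite | github.com/kkShrihari/Python | Structural_Bioinformatics/Atomic_composition.py | amino_acid_charge_composition_calculator
-- ===== SOURCE A (Python) =====
-- def amino_acid_charge_composition_calculator(amino_acid_composition):
--
--     amino_acid_charge_composition = {"Positive": 0, "Negative": 0}
--     Positive_list = ['ARG','LYS',"HIS"]
--     Negative_list = ['ASP','GLU']
--     Positive = 0
--     Negative = 0
--     for codons in amino_acid_composition:
--         value = amino_acid_composition.get(codons)
--         if codons in Positive_list:
--             Positive += value
--         elif codons in Negative_list:
--             Negative += value
--         else:
--             continue
--
--     amino_acid_charge_composition.update({"Positive": Positive})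
--     amino_acid_charge_composition.update({"Negative": Negative})
--
--     return amino_acid_charge_composition
-- ===== SOURCE B (Python) =====
-- def amino_acid_charge_composition_calculator(amino_acid_composition):
--     Positive = sum(amino_acid_composition.get(a, 0) for a in ['ARG', 'LYS', 'HIS'])
--     Negative = sum(amino_acid_composition.get(a, 0) for a in ['ASP', 'GLU'])
--     return {"Positive": Positive, "Negative": Negative}
-- ===== Notes on version B (the rewrite author's own statement) =====
-- stated objective: simpler
-- what changed: Instead of scanning every dict key and classifying it against the two charged lists, B probes the dict directly with the five known charged keys via .get(a, 0) and builds the result dict in one expression.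
import Mathlib
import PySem

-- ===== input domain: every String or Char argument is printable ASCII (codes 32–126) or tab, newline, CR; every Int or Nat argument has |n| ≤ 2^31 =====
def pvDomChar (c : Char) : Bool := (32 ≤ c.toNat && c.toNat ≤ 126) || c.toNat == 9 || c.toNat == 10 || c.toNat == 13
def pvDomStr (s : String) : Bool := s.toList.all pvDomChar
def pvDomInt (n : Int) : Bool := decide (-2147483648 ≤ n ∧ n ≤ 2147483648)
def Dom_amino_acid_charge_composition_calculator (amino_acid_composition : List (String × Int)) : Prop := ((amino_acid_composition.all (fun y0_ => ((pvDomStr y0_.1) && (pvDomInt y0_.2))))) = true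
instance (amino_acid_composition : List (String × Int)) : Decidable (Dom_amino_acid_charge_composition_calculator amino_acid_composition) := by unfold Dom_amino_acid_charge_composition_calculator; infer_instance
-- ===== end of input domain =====

-- B traverses the two fixed charged-residue lists and probes the dict with .get(a, 0),
-- instead of A's scan over every dict key classified against those lists (objective: simpler).

-- ===== PORT A =====
-- for codons in amino_acid_composition: value = d.get(codons); classify; then two .update calls
def amino_acid_charge_composition_calculator (amino_acid_composition : List (String × Int)) : List (String × Int) :=
  let d : PySem.Dict String Int := PySem.Dict.mk amino_acid_composition
  let acc : PySem.Dict String Int := PySem.Dict.mk [("Positive", 0), ("Negative", 0)]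
  let Positive_list : List String := ["ARG", "LYS", "HIS"]
  let Negative_list : List String := ["ASP", "GLU"]
  let pn : Int × Int := (PySem.Dict.keys d).foldl (fun (pn : Int × Int) codons =>
      -- value = amino_acid_composition.get(codons); the key is present, so .get returns its value
      if codons ∈ Positive_list then (pn.1 + (PySem.Dict.get? d codons).getD 0, pn.2)
      else if codons ∈ Negative_list then (pn.1, pn.2 + (PySem.Dict.get? d codons).getD 0)
      else pn) (0, 0)
  ((acc.update [("Positive", pn.1)]).update [("Negative", pn.2)]).items

-- ===== PORT B =====
def amino_acid_charge_composition_calculator_alt (amino_acid_composition : List (String × Int)) : List (String × Int) :=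
  let d : PySem.Dict String Int := PySem.Dict.mk amino_acid_composition
  let Positive : Int := (["ARG", "LYS", "HIS"].map (fun a => d.getD a 0)).sum
  let Negative : Int := (["ASP", "GLU"].map (fun a => d.getD a 0)).sum
  [("Positive", Positive), ("Negative", Negative)]

-- ===== PRECONDITION & SPEC =====
-- Pre_ excludes association lists with duplicate keys: they do not represent any Python
-- dict (A's argument is a dict, whose keys are unique), so nothing is claimed about them.
def Pre_amino_acid_charge_composition_calculator (amino_acid_composition : List (String × Int)) : Prop :=
  (amino_acid_composition.map Prod.fst).Nodup
instance (amino_acid_composition : List (String × Int)) : Decidable (Pre_amino_acid_charge_composition_calculator amino_acid_composition) := by unfold Pre_amino_acid_charge_composition_calculator; infer_instance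

def pvWitness_amino_acid_charge_composition_calculator : (List (String × Int)) := [("ARG", 2), ("GLY", 5), ("GLU", -3)]

def Spec_amino_acid_charge_composition_calculator (amino_acid_composition : List (String × Int)) (out : List (String × Int)) : Prop := out = amino_acid_charge_composition_calculator_alt amino_acid_composition
instance (amino_acid_composition : List (String × Int)) (out : List (String × Int)) : Decidable (Spec_amino_acid_charge_composition_calculator amino_acid_composition out) := by unfold Spec_amino_acid_charge_composition_calculator; infer_instance

-- ===== CLAIM (what is proved, stated in full; the proofs are below) =====
def Claim_equal_amino_acid_charge_composition_calculator : Prop := ∀ (amino_acid_composition : List (String × Int)), Dom_amino_acid_charge_composition_calculator amino_acid_composition → Pre_amino_acid_charge_composition_calculator amino_acid_composition → Spec_amino_acid_charge_composition_calculator amino_acid_composition (amino_acid_charge_composition_calculator amino_acid_composition)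

-- ===== LEMMAS AND PROOFS =====

-- sum of the filtered values of an association list (A's accumulators, in closed form)
def pvSumIn (L : List String) (rest : List (String × Int)) : Int :=
  ((rest.filter (fun q => decide (q.1 ∈ L))).map Prod.snd).sum

-- A's loop, run over the keys of `rest` but looking values up in the fixed dict `d`
lemma pv_loop_eq (d : PySem.Dict String Int) (rest : List (String × Int)) (pn : Int × Int)
    (h : ∀ p ∈ rest, d.get? p.1 = some p.2) :
    (List.map (fun x => x.1) rest).foldl (fun (pn : Int × Int) codons =>
      if codons ∈ ["ARG", "LYS", "HIS"] then (pn.1 + (d.get? codons).getD 0, pn.2)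
      else if codons ∈ ["ASP", "GLU"] then (pn.1, pn.2 + (d.get? codons).getD 0)
      else pn) pn
    = (pn.1 + pvSumIn ["ARG", "LYS", "HIS"] rest, pn.2 + pvSumIn ["ASP", "GLU"] rest) := by
  induction rest generalizing pn with
  | nil => simp [pvSumIn]
  | cons p t ih =>
    obtain ⟨k, v⟩ := p
    have hk : d.get? k = some v := h (k, v) (List.mem_cons_self)
    have ht : ∀ q ∈ t, d.get? q.1 = some q.2 := fun q hq => h q (List.mem_cons_of_mem _ hq)
    simp only [List.map_cons, List.foldl_cons, hk, Option.getD_some]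
    rw [ih _ ht]
    by_cases h1 : k ∈ (["ARG", "LYS", "HIS"] : List String)
    · have h1' := h1
      simp only [List.mem_cons, List.not_mem_nil, or_false] at h1'
      rcases h1' with rfl | rfl | rfl <;>
        simp [pvSumIn] <;> omega
    · by_cases h2 : k ∈ (["ASP", "GLU"] : List String)
      · have h2' := h2
        simp only [List.mem_cons, List.not_mem_nil, or_false] at h2'
        rcases h2' with rfl | rfl <;>
          simp [pvSumIn] <;> omega
      · have n1 : ¬ (k = "ARG" ∨ k = "LYS" ∨ k = "HIS") := by simpa using h1
        have n2 : ¬ (k = "ASP" ∨ k = "GLU") := by simpa using h2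
        simp [pvSumIn, h1, h2, n1, n2]

-- a sum of `if k = a then v else g a` over a duplicate-free list, in closed form
lemma pv_sum_map_ite (L : List String) (hL : L.Nodup) (k : String) (v : Int) (g : String → Int) :
    (L.map (fun a => if k = a then v else g a)).sum
      = (if k ∈ L then v - g k else 0) + (L.map g).sum := by
  induction L with
  | nil => simp
  | cons a t ih =>
    rcases List.nodup_cons.mp hL with ⟨ha, ht⟩
    by_cases hk : k = a
    · subst hk
      have hmap : (t.map (fun a => if k = a then v else g a)) = t.map g := by
        apply List.map_congr_left
        intro b hb
        have : k ≠ b := fun e => ha (e ▸ hb)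
        simp [this]
      simp [hmap, ha]
      ring
    · simp only [List.map_cons, List.sum_cons, if_neg hk, ih ht]
      by_cases hm : k ∈ t <;> simp [hm, hk] <;> try ring

-- A's filtered sum equals B's probe-by-key sum, for duplicate-free keys
lemma pv_sum_filter_eq (L : List String) (hL : L.Nodup) (d : List (String × Int))
    (hd : (d.map Prod.fst).Nodup) :
    pvSumIn L d = (L.map (fun a => (PySem.Dict.mk d).getD a 0)).sum := by
  induction d with
  | nil => simp [pvSumIn, PySem.Dict.getD, PySem.Dict.get?]
  | cons p t ih =>
    obtain ⟨k, v⟩ := p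
    rcases List.nodup_cons.mp hd with ⟨hk, htnd⟩
    have hgt : ∀ a, (PySem.Dict.mk ((k, v) :: t)).getD a 0
        = if k = a then v else (PySem.Dict.mk t).getD a 0 := by
      intro a
      simp only [PySem.Dict.getD_eq_get?_getD, PySem.Dict.get?_mk_cons]
      by_cases h : k = a <;> simp [h]
    have hgk : (PySem.Dict.mk t).getD k 0 = 0 := by
      apply PySem.Dict.getD_of_not_contains
      rw [PySem.Dict.contains_eq_decide_mem_keys]
      simpa [PySem.Dict.keys] using hk
    have hmap : (L.map (fun a => (PySem.Dict.mk ((k, v) :: t)).getD a 0))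
        = L.map (fun a => if k = a then v else (PySem.Dict.mk t).getD a 0) :=
      List.map_congr_left (fun a _ => hgt a)
    rw [hmap, pv_sum_map_ite L hL k v _, ← ih htnd]
    by_cases hm : k ∈ L
    · simp [pvSumIn, hm, hgk]
    · simp [pvSumIn, hm]

-- lookups in an association list with duplicate-free keys return each pair's own value
lemma pv_get_own (d : List (String × Int)) (hd : (d.map Prod.fst).Nodup) :
    ∀ p ∈ d, (PySem.Dict.mk d).get? p.1 = some p.2 := by
  intro p hp
  obtain ⟨k, v⟩ := p
  apply PySem.Dict.get?_of_mem_items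
  · exact hp
  · simpa [PySem.Dict.keys] using hd

-- A's final dict construction, in closed form
lemma pv_out_shape (P N : Int) :
    (((PySem.Dict.mk [("Positive", (0 : Int)), ("Negative", 0)]).update
        [("Positive", P)]).update [("Negative", N)]).items
      = [("Positive", P), ("Negative", N)] := by
  rfl

-- ===== VERDICT (by name: the statement is the Claim_ definition above) =====
theorem amino_acid_charge_composition_calculator_spec : Claim_equal_amino_acid_charge_composition_calculator := by
  intro d _hDom hPre
  unfold Spec_amino_acid_charge_composition_calculator
  unfold amino_acid_charge_composition_calculator amino_acid_charge_composition_calculator_alt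
  simp only [PySem.Dict.keys]
  rw [pv_loop_eq (PySem.Dict.mk d) d (0, 0) (pv_get_own d hPre)]
  rw [pv_out_shape]
  rw [pv_sum_filter_eq ["ARG", "LYS", "HIS"] (by decide) d hPre,
      pv_sum_filter_eq ["ASP", "GLU"] (by decide) d hPre]
  simp
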